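-- pv_equiv track=rewrite | github.com/pypi-data/pypi-mirror-397 | packages/maxminddb-rust/maxminddb_rust-0.3.0.tar.gz/maxminddb_rust-0.3.0/examples/batch_processing.py | generate_sample_ips
-- ===== SOURCE A (Python) =====
-- from typing import List
--
-- def generate_sample_ips(count: int = 100) -> List[str]:
--     """Generate a list of sample IP addresses for testing."""
--     sample_ips = [
--         "8.8.8.8",  # Google DNS
--         "1.1.1.1",  # Cloudflare DNS
--         "208.67.222.222",  # OpenDNS
--         "9.9.9.9",  # Quad9 DNS
--         "149.112.112.112",  # Quad9 secondary
--         "64.6.64.6",  # Verisign DNS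
--         "8.26.56.26",  # Comodo DNS
--         "156.154.70.1",  # Neustar DNS
--         "198.41.0.4",  # a.root-servers.net
--         "199.9.14.201",  # b.root-servers.net
--     ]
--
--     # Repeat the sample IPs to reach the desired count
--     result = []
--     while len(result) < count:
--         result.extend(sample_ips)
--
--     return result[:count]
-- ===== SOURCE B (Python) =====
-- from typing import List
--
-- def generate_sample_ips(count: int = 100) -> List[str]:
--     """Generate a list of sample IP addresses for testing."""
--     sample_ips = [
--         "8.8.8.8",
--         "1.1.1.1",
--         "208.67.222.222",
--         "9.9.9.9",
--         "149.112.112.112",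
--         "64.6.64.6",
--         "8.26.56.26",
--         "156.154.70.1",
--         "198.41.0.4",
--         "199.9.14.201",
--     ]
--     # build element-by-element by modular index: no tiling, no slicing
--     return [sample_ips[i % len(sample_ips)] for i in range(count)]
-- ===== Notes on version B (the rewrite author's own statement) =====
-- stated objective: simpler
-- what changed: Instead of tiling the list with a while/extend loop and slicing, B constructs the result element by element as a single comprehension indexing sample_ips by i modulo its length for i in range(count); there is no over-build and no slice.
import Mathlib
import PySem

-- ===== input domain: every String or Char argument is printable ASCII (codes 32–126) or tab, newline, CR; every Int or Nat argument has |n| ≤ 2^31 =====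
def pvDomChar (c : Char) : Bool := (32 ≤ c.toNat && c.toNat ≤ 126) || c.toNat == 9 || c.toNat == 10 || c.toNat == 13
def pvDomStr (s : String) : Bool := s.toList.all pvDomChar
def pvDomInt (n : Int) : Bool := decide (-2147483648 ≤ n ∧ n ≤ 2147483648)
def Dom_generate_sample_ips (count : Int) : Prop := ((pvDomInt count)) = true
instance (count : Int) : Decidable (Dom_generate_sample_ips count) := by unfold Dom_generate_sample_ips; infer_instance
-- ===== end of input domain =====

-- ===== PORT A =====
-- B builds the result element-by-element by modular indexing instead of A's tile-then-slice loop; objective: simpler.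

-- the literal sample_ips list both Pythons contain
def sampleIPs : List String :=
  ["8.8.8.8", "1.1.1.1", "208.67.222.222", "9.9.9.9", "149.112.112.112",
   "64.6.64.6", "8.26.56.26", "156.154.70.1", "198.41.0.4", "199.9.14.201"]

theorem sampleIPs_len : sampleIPs.length = 10 := rfl

-- termination measure of the loop (stated as a lemma the port cites by name,
-- keeping the well-founded recursion's embedded proof term small)
theorem genLoopA_dec (count : Int) (result : List String)
    (h : (result.length : Int) < count) :
    (count - ((result ++ sampleIPs).length : Int)).toNat
      < (count - (result.length : Int)).toNat := by
  rw [List.length_append, sampleIPs_len]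
  omega

-- the 'while len(result) < count: result.extend(sample_ips)' loop
def genLoopA (count : Int) (result : List String) : List String :=
  if (result.length : Int) < count then genLoopA count (result ++ sampleIPs) else result
termination_by (count - result.length).toNat
decreasing_by exact genLoopA_dec count result (by assumption)

def generate_sample_ips (count : Int) : List String :=
  PySem.List.slice (genLoopA count []) none (some count)

-- ===== PORT B =====
-- [sample_ips[i % len(sample_ips)] for i in range(count)]
-- (the index i % 10 is always in range, so pyGetD's default is never taken)
def generate_sample_ips_alt (count : Int) : List String :=
  (PySem.List.pyRange 0 count 1).map
    (fun i => PySem.List.pyGetD sampleIPs (PySem.Int.mod i (sampleIPs.length : Int)) "")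

-- ===== PRECONDITION & SPEC =====
def Spec_generate_sample_ips (count : Int) (out : List String) : Prop := out = generate_sample_ips_alt count
instance (count : Int) (out : List String) : Decidable (Spec_generate_sample_ips count out) := by unfold Spec_generate_sample_ips; infer_instance

-- ===== CLAIM (what is proved, stated in full; the proofs are below) =====
def Claim_equal_generate_sample_ips : Prop := ∀ (count : Int), Dom_generate_sample_ips count → Spec_generate_sample_ips count (generate_sample_ips count)

-- ===== LEMMAS AND PROOFS =====

theorem flatten_replicate_length (m : Nat) :
    ((List.replicate m sampleIPs).flatten).length = m * 10 := by
  simp [List.length_flatten, sampleIPs]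

-- the loop result is a whole number of copies of sampleIPs, long enough
theorem genLoopA_spec (count : Int) (result : List String) :
    ∃ m : Nat, genLoopA count result = result ++ (List.replicate m sampleIPs).flatten ∧
      ((count ≤ result.length) ∨ (count ≤ (genLoopA count result).length)) := by
  fun_induction genLoopA count result with
  | case1 result h ih =>
    obtain ⟨m, hm, hlen⟩ := ih
    refine ⟨m + 1, ?_, Or.inr ?_⟩
    · rw [hm, List.replicate_succ, List.flatten_cons, List.append_assoc]
    · rcases hlen with h' | h'
      · rw [hm]
        have hfl := flatten_replicate_length m
        have hs : sampleIPs.length = 10 := by simp [sampleIPs]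
        simp only [List.length_append, hfl, hs] at h' ⊢
        push_cast at h' ⊢
        omega
      · exact h'
  | case2 result h =>
    exact ⟨0, by simp, Or.inl (by omega)⟩

-- element i of a stack of copies is sampleIPs[i % 10]
theorem getElem?_flatten_replicate (m i : Nat) (h : i < m * 10) :
    ((List.replicate m sampleIPs).flatten)[i]? = sampleIPs[i % 10]? := by
  induction m generalizing i with
  | zero => omega
  | succ m ih =>
    rw [List.replicate_succ, List.flatten_cons]
    by_cases hi : i < 10
    · rw [List.getElem?_append_left (by simp [sampleIPs]; omega), Nat.mod_eq_of_lt hi]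
    · have hlen : sampleIPs.length = 10 := by simp [sampleIPs]
      rw [List.getElem?_append_right (by omega), hlen, ih (i - 10) (by omega)]
      congr 1
      omega

-- ===== VERDICT (by name: the statement is the Claim_ definition above) =====
theorem generate_sample_ips_spec : Claim_equal_generate_sample_ips := by
  intro count _
  unfold Spec_generate_sample_ips generate_sample_ips generate_sample_ips_alt
  obtain ⟨m, hm, hlen⟩ := genLoopA_spec count []
  simp only [List.nil_append] at hm
  rw [hm, PySem.List.pyRange_one]
  have hs : sampleIPs.length = 10 := by simp [sampleIPs]
  by_cases hc : 0 ≤ count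
  · have hmlen : count ≤ (m : Int) * 10 := by
      rcases hlen with h' | h'
      · simp at h'; omega
      · rw [hm] at h'
        have := flatten_replicate_length m
        omega
    rw [PySem.List.slice_to _ hc]
    apply List.ext_getElem?
    intro i
    by_cases hi : i < count.toNat
    · have hi' : i < (count - 0).toNat := by omega
      rw [List.getElem?_take_of_lt (by omega),
        getElem?_flatten_replicate m i (by omega),
        List.getElem?_map, List.getElem?_map, List.getElem?_range hi']
      simp only [Option.map_some]
      have hmod : PySem.Int.mod (0 + (i : Int)) ((sampleIPs.length : Nat) : Int)
          = ((i % 10 : Nat) : Int) := by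
        rw [hs, zero_add]
        exact_mod_cast PySem.Int.mod_natCast i 10
      rw [hmod, PySem.List.pyGetD_natCast]
      have hlt : i % 10 < sampleIPs.length := by rw [hs]; exact Nat.mod_lt _ (by omega)
      rw [List.getElem?_eq_getElem hlt, List.getD_eq_getElem _ _ hlt]
    · rw [List.getElem?_eq_none (by simp; omega), List.getElem?_eq_none (by simp; omega)]
  · have h0 : genLoopA count [] = [] := by
      rw [genLoopA, if_neg (by simp; omega)]
    rw [hm] at h0
    have hl := congrArg List.length h0
    rw [flatten_replicate_length] at hl
    simp at hl
    have hr : (count - 0).toNat = 0 := by omega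
    rw [hl, hr]
    simp [PySem.List.slice]
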